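-- pv_equiv track=rewrite | github.com/starswap/CompetitiveProgramming | CodeForces/1891/C.py | solve
-- ===== SOURCE A (Python) =====
-- from collections import deque
--
-- def solve(ms):
--     ms.sort()
--     q = deque(ms)
--     x = 0
--     steps = 0
--
--     while len(q) > 1:
--         time_to_combo = q[-1] - x
--         delta = min(time_to_combo, q[0])
--         q[0] -= delta
--         x += delta
--         steps += delta
--         if q[0] == 0:
--             q.popleft()
--         if x == q[-1]: # execute combo
--             x = 0
--             q.pop()
--             steps += 1
--
--     if (len(q) > 0): # one left
--         targ = (x + q[-1]) // 2
--         amt_needed = targ - x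
--
--         # build combo
--         steps += amt_needed
--         q[-1] -= amt_needed
--         x += amt_needed
--
--         # use combo
--         if x != 0:
--             x = 0
--             steps += 1
--
--         # do any remaining (at most 1)
--         q[-1] -= targ
--         steps += q[-1]
--     return steps
-- ===== SOURCE B (Python) =====
-- from collections import deque
--
-- def solve(ms):
--     ms.sort()
--     total = sum(ms)
--     work = deque(ms)
--     combos = 0
--     comboed = 0  # health removed by full combos
--     # Round by round: manually kill the smallest monsters, feeding their health
--     # into the gauge, until it can pay for the current largest monster; then
--     # combo-kill that monster.  The monster the charge stopped inside keeps its
--     # unspent health at the front.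
--     while len(work) >= 2:
--         top = work[-1]
--         gauge = 0
--         charged = False
--         while len(work) >= 2:
--             gauge += work.popleft()
--             if gauge >= top:
--                 charged = True
--                 break
--         if not charged:
--             break
--         combos += 1
--         comboed += top
--         work.pop()
--         if gauge > top:
--             work.appendleft(gauge - top)
--     if work:
--         # One monster's worth is left.  Each full round removed 2*top health
--         # (top by hand, top by the combo); halve the rest with one last combo,
--         # used only if it deals damage.
--         rem = total - 2 * comboed
--         if rem // 2 != 0:
--             combos += 1
--     # Every unit of health is dealt by hand except the floor(total/2) removed
--     # by combos; each combo itself is one extra action.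
--     return (total - total // 2) + combos
-- ===== Notes on version B (the rewrite author's own statement) =====
-- stated objective: alternative
-- what changed: Replaces A's unit-granularity gauge simulation (advancing by min(time_to_combo, smallest health) with per-step bookkeeping) by round-based accounting: one amortized front-feeding scan per combo round to count combos and comboed health, with the manual actions obtained in closed form as total - total//2.
import Mathlib
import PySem

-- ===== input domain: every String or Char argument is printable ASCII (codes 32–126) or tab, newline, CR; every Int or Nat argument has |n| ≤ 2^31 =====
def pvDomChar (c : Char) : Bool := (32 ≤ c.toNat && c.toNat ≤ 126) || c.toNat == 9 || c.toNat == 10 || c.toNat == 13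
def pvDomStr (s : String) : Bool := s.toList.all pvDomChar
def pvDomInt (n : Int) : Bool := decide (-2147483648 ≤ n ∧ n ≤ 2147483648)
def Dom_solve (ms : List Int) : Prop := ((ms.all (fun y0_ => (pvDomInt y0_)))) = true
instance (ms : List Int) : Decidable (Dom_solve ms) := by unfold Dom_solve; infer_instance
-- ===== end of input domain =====

-- B replaces A's unit-step gauge simulation by round-based accounting (combos counted by
-- an amortized feeding scan, manual actions in closed form). Both Pythons sort the
-- argument in place; the equivalence proved is about the return value.

-- helper lemmas cited by name in the ports' decreasing_by (termination only)
theorem getLastD_irrel (m : List Int) (hm : m ≠ []) (c d : Int) :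
    m.getLastD c = m.getLastD d := by
  cases m with
  | nil => simp at hm
  | cons h t =>
      cases t with
      | nil => rfl
      | cons h2 t2 =>
          conv_lhs => rw [List.getLastD_cons]
          conv_rhs => rw [List.getLastD_cons]

theorem getLastD_cons_ne (a d : Int) (m : List Int) (hm : m ≠ []) :
    (a :: m).getLastD d = m.getLastD d := by
  rw [List.getLastD_cons]; exact getLastD_irrel m hm a d

theorem dec_dropLast (a b : Int) (rest : List Int) :
    ((b :: rest).dropLast).length < (a :: b :: rest).length := by
  simp [List.length_dropLast]

theorem dec_tail (a b : Int) (rest : List Int) :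
    (b :: rest).length < (a :: b :: rest).length := by simp

theorem dec_dropLast2 (c a b : Int) (rest : List Int) :
    ((c :: b :: rest).dropLast).length < (a :: b :: rest).length := by
  simp [List.length_dropLast]

theorem dec_absurd (a b x : Int) (rest : List Int)
    (h1 : a - min ((b :: rest).getLastD 0 - x) a ≠ 0)
    (h2 : x + min ((b :: rest).getLastD 0 - x) a
          ≠ ((a - min ((b :: rest).getLastD 0 - x) a) :: b :: rest).getLastD 0) :
    ((a - min ((b :: rest).getLastD 0 - x) a) :: b :: rest).length < (a :: b :: rest).length := by
  exfalso
  rw [getLastD_cons_ne _ 0 (b :: rest) (by simp)] at h2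
  omega

-- ===== PORT A =====
-- the while-loop and the trailing "one left" block of A, fused into one recursion on the deque
def solveAux : List Int → Int → Int → Int
  | [], _, steps => steps
  | [h], x, steps =>
      -- targ = (x + q[-1]) // 2 ; amt_needed = targ - x ; build combo, use combo, finish
      let targ := PySem.Int.floordiv (x + h) 2
      let amt := targ - x
      let steps1 := steps + amt
      let steps2 := if x + amt ≠ 0 then steps1 + 1 else steps1
      steps2 + ((h - amt) - targ)
  | a :: b :: rest, x, steps =>
      -- time_to_combo = q[-1] - x ; delta = min(time_to_combo, q[0])
      if h1 : a - min ((b :: rest).getLastD 0 - x) a = 0 then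
        -- q[0] became 0: popleft
        if h2 : x + min ((b :: rest).getLastD 0 - x) a = (b :: rest).getLastD 0 then
          solveAux ((b :: rest).dropLast) 0 (steps + min ((b :: rest).getLastD 0 - x) a + 1)
        else
          solveAux (b :: rest) (x + min ((b :: rest).getLastD 0 - x) a) (steps + min ((b :: rest).getLastD 0 - x) a)
      else
        if h2 : x + min ((b :: rest).getLastD 0 - x) a = ((a - min ((b :: rest).getLastD 0 - x) a) :: b :: rest).getLastD 0 then
          solveAux (((a - min ((b :: rest).getLastD 0 - x) a) :: b :: rest).dropLast) 0 (steps + min ((b :: rest).getLastD 0 - x) a + 1)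
        else
          solveAux ((a - min ((b :: rest).getLastD 0 - x) a) :: b :: rest) (x + min ((b :: rest).getLastD 0 - x) a) (steps + min ((b :: rest).getLastD 0 - x) a)
  termination_by l _ _ => l.length
  decreasing_by
  · exact dec_dropLast a b rest
  · exact dec_tail a b rest
  · exact dec_dropLast2 _ a b rest
  · exact dec_absurd a b x rest h1 h2

def solve (ms : List Int) : Int := solveAux (PySem.List.sorted ms (fun v => v)) 0 0

-- ===== PORT B =====
-- the inner loop: feed front monsters into the gauge until it reaches 'top' (then the
-- remaining deque is returned) or only the top monster is left (not charged)
def bscan : List Int → Int → Int → Option (Int × List Int)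
  | [], _, _ => none
  | [_], _, _ => none
  | c :: c2 :: cs, g, top =>
      if g + c ≥ top then some (g + c, c2 :: cs) else bscan (c2 :: cs) (g + c) top

-- termination helper for the outer loop, cited in decreasing_by
theorem bscan_length (w : List Int) (g top g' : Int) (cs : List Int)
    (h : bscan w g top = some (g', cs)) : cs.length < w.length := by
  induction w generalizing g with
  | nil => simp [bscan] at h
  | cons c w ih =>
      cases w with
      | nil => simp [bscan] at h
      | cons c2 cs2 =>
          rw [bscan] at h
          split_ifs at h with hc
          · simp only [Option.some.injEq, Prod.mk.injEq] at h
            obtain ⟨h1, h2⟩ := h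
            rw [← h2]
            simp
          · have := ih (g + c) h
            simp at this ⊢
            omega

-- termination helper for the outer loop, cited in decreasing_by
theorem phase_dec (g t : Int) (cs : List Int) (n : Nat) (h : cs.length < n) (h2 : 2 ≤ n) :
    ((if g - t > 0 then [g - t] else []) ++ cs.dropLast).length < n := by
  rcases cs with _ | ⟨c, cs⟩ <;> split_ifs <;> simp_all [List.length_dropLast] <;> omega

theorem two_le_len (a b : Int) (rest : List Int) : 2 ≤ (a :: b :: rest).length := by
  simp

-- the outer loop: work/combos/comboed state; returns (combos, final work, comboed health)
def bphases : List Int → Int × List Int × Int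
  | [] => (0, [], 0)
  | [h] => (0, [h], 0)
  | a :: b :: rest =>
      match hbs : bscan (a :: b :: rest) 0 ((b :: rest).getLastD 0) with
      | none => (0, [(b :: rest).getLastD 0], 0)
      | some (g, cs) =>
          let r := bphases
            ((if g - (b :: rest).getLastD 0 > 0 then [g - (b :: rest).getLastD 0] else []) ++ cs.dropLast)
          (r.1 + 1, r.2.1, r.2.2 + (b :: rest).getLastD 0)
  termination_by w => w.length
  decreasing_by
  exact phase_dec _ _ _ _ (bscan_length _ _ _ _ _ hbs) (two_le_len a b rest)

def solve_alt (ms : List Int) : Int :=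
  let s := PySem.List.sorted ms (fun v => v)
  let total := s.sum
  let r := bphases s
  let fin : Int := if r.2.1 ≠ [] ∧ PySem.Int.floordiv (total - 2 * r.2.2) 2 ≠ 0 then 1 else 0
  (total - PySem.Int.floordiv total 2) + r.1 + fin

-- ===== PRECONDITION & SPEC =====
def Spec_solve (ms : List Int) (out : Int) : Prop := out = solve_alt ms
instance (ms : List Int) (out : Int) : Decidable (Spec_solve ms out) := by unfold Spec_solve; infer_instance

-- ===== CLAIM (what is proved, stated in full; the proofs are below) =====
def Claim_equal_solve : Prop := ∀ (ms : List Int), Dom_solve ms → Spec_solve ms (solve ms)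

-- ===== LEMMAS AND PROOFS =====

theorem dropLast_append_getLastD (m : List Int) (hm : m ≠ []) :
    m.dropLast ++ [m.getLastD 0] = m := by
  induction m with
  | nil => simp at hm
  | cons h t ih =>
      cases t with
      | nil => simp
      | cons h2 t2 =>
          rw [getLastD_cons_ne h 0 (h2 :: t2) (by simp), List.dropLast_cons₂,
            List.cons_append, ih (by simp)]

-- the gauge accumulated by bscan is the sum of the fed elements
theorem bscan_sum (w : List Int) (g top g' : Int) (cs : List Int)
    (h : bscan w g top = some (g', cs)) : g' + cs.sum = g + w.sum := by
  induction w generalizing g with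
  | nil => simp [bscan] at h
  | cons c w ih =>
      cases w with
      | nil => simp [bscan] at h
      | cons c2 cs2 =>
          rw [bscan] at h
          split_ifs at h with hc
          · simp only [Option.some.injEq, Prod.mk.injEq] at h
            obtain ⟨h1, h2⟩ := h
            rw [← h1, ← h2]
            simp
            ring
          · have := ih (g + c) h
            simp at this ⊢
            omega

theorem bscan_ge (w : List Int) (g top g' : Int) (cs : List Int)
    (h : bscan w g top = some (g', cs)) : top ≤ g' := by
  induction w generalizing g with
  | nil => simp [bscan] at h
  | cons c w ih =>
      cases w with
      | nil => simp [bscan] at h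
      | cons c2 cs2 =>
          rw [bscan] at h
          split_ifs at h with hc
          · simp only [Option.some.injEq, Prod.mk.injEq] at h
            omega
          · exact ih (g + c) h

-- bscan returns a suffix still ending in the original last element
theorem bscan_last (w : List Int) (g top g' : Int) (cs : List Int)
    (h : bscan w g top = some (g', cs)) : cs ≠ [] ∧ cs.getLastD 0 = w.getLastD 0 := by
  induction w generalizing g with
  | nil => simp [bscan] at h
  | cons c w ih =>
      cases w with
      | nil => simp [bscan] at h
      | cons c2 cs2 =>
          rw [bscan] at h
          split_ifs at h with hc
          · simp only [Option.some.injEq, Prod.mk.injEq] at h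
            obtain ⟨h1, h2⟩ := h
            rw [← h2]
            exact ⟨by simp, (getLastD_cons_ne c 0 (c2 :: cs2) (by simp)).symm⟩
          · have := ih (g + c) h
            exact ⟨this.1, this.2.trans (getLastD_cons_ne c 0 (c2 :: cs2) (by simp)).symm⟩

-- proof-side characterisation: combo count (full kills + the final partial combo) of A's
-- simulation from a state with list l and gauge x
def kcount : List Int → Int → Int
  | [], _ => 0
  | [h], x => if (x + h) / 2 ≠ 0 then 1 else 0
  | a :: b :: rest, x =>
      match hbs : bscan (a :: b :: rest) x ((b :: rest).getLastD 0) with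
      | none => if (x + (a :: b :: rest).sum) / 2 ≠ 0 then 1 else 0
      | some (g, cs) =>
          1 + kcount
            ((if g - (b :: rest).getLastD 0 > 0 then [g - (b :: rest).getLastD 0] else []) ++ cs.dropLast)
            0
  termination_by w _ => w.length
  decreasing_by
  exact phase_dec _ _ _ _ (bscan_length _ _ _ _ _ hbs) (two_le_len a b rest)

-- unfolding lemmas for the match in kcount / bphases
theorem kcount_cc_none (a b : Int) (rest : List Int) (x : Int)
    (h : bscan (a :: b :: rest) x ((b :: rest).getLastD 0) = none) :
    kcount (a :: b :: rest) x = if (x + (a :: b :: rest).sum) / 2 ≠ 0 then 1 else 0 := by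
  rw [kcount]
  split <;> simp_all

theorem kcount_cc_some (a b : Int) (rest : List Int) (x g : Int) (cs : List Int)
    (h : bscan (a :: b :: rest) x ((b :: rest).getLastD 0) = some (g, cs)) :
    kcount (a :: b :: rest) x
      = 1 + kcount
          ((if g - (b :: rest).getLastD 0 > 0 then [g - (b :: rest).getLastD 0] else []) ++ cs.dropLast)
          0 := by
  rw [kcount]
  split <;> simp_all

theorem bphases_cc_none (a b : Int) (rest : List Int)
    (h : bscan (a :: b :: rest) 0 ((b :: rest).getLastD 0) = none) :
    bphases (a :: b :: rest) = (0, [(b :: rest).getLastD 0], 0) := by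
  rw [bphases]
  split <;> simp_all

theorem bphases_cc_some (a b : Int) (rest : List Int) (g : Int) (cs : List Int)
    (h : bscan (a :: b :: rest) 0 ((b :: rest).getLastD 0) = some (g, cs)) :
    bphases (a :: b :: rest)
      = ((bphases ((if g - (b :: rest).getLastD 0 > 0 then [g - (b :: rest).getLastD 0] else []) ++ cs.dropLast)).1 + 1,
         (bphases ((if g - (b :: rest).getLastD 0 > 0 then [g - (b :: rest).getLastD 0] else []) ++ cs.dropLast)).2.1,
         (bphases ((if g - (b :: rest).getLastD 0 > 0 then [g - (b :: rest).getLastD 0] else []) ++ cs.dropLast)).2.2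
           + (b :: rest).getLastD 0) := by
  rw [bphases]
  split <;> simp_all

-- absorbing the bottom monster into the gauge does not change the combo count
theorem kcount_shift (a : Int) (m : List Int) (x : Int) (hm : m ≠ [])
    (hlt : x + a < m.getLastD 0) : kcount (a :: m) x = kcount m (x + a) := by
  cases m with
  | nil => simp at hm
  | cons b rest =>
      cases rest with
      | nil =>
          rw [kcount_cc_none a b [] x (by rw [bscan, if_neg (by simpa using hlt)]; rfl)]
          rw [kcount]
          simp only [List.sum_cons, List.sum_nil]
          split_ifs <;> omega
      | cons c rest2 =>
          have htop : ((c :: rest2) : List Int).getLastD 0 = ((b :: c :: rest2) : List Int).getLastD 0 :=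
            (getLastD_cons_ne b 0 (c :: rest2) (by simp)).symm
          have hstep : bscan (a :: b :: c :: rest2) x ((b :: c :: rest2).getLastD 0)
              = bscan (b :: c :: rest2) (x + a) ((c :: rest2).getLastD 0) := by
            rw [bscan, if_neg (by omega), htop]
          cases hbs : bscan (b :: c :: rest2) (x + a) ((c :: rest2).getLastD 0) with
          | none =>
              rw [kcount_cc_none a b (c :: rest2) x (hstep.trans hbs),
                kcount_cc_none b c rest2 (x + a) hbs]
              simp only [List.sum_cons]
              split_ifs <;> omega
          | some p =>
              rw [kcount_cc_some a b (c :: rest2) x p.1 p.2 (hstep.trans (by rw [hbs])),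
                kcount_cc_some b c rest2 (x + a) p.1 p.2 (by rw [hbs]),
                htop]

-- the main invariant: A's simulation from state (l, x, steps) returns
-- steps + ceil((sum l - x)/2) + kcount l x
theorem loop_eq (l : List Int) (x steps : Int) :
    (l = [] → x = 0) →
    solveAux l x steps = steps + (l.sum - x + 1) / 2 + kcount l x := by
  induction l, x, steps using solveAux.induct with
  | case1 x steps =>
      intro hx0
      simp [solveAux, hx0 rfl, kcount]
  | case2 h x steps =>
      intro _
      rw [solveAux, kcount, PySem.Int.floordiv_eq_ediv_of_pos (by norm_num)]
      simp only [List.sum_cons, List.sum_nil]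
      split_ifs <;> omega
  | case3 a b rest x steps h1 h2 ih =>
      intro _
      have hmin : min ((b :: rest).getLastD 0 - x) a = a := by omega
      rw [solveAux, dif_pos h1, dif_pos h2, ih (by simp)]
      rw [kcount_cc_some a b rest x (x + a) (b :: rest) (by rw [bscan, if_pos (by omega)])]
      rw [show ((if x + a - (b :: rest).getLastD 0 > 0
              then [x + a - (b :: rest).getLastD 0] else []) ++ (b :: rest).dropLast : List Int)
            = (b :: rest).dropLast from by rw [if_neg (by omega)]; simp]
      simp only [List.sum_cons]
      have hsd : (b :: rest).dropLast.sum + (b :: rest).getLastD 0 = (b :: rest).sum := by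
        conv_rhs => rw [← dropLast_append_getLastD (b :: rest) (by simp)]
        simp
      have hbr : ((b :: rest) : List Int).sum = b + rest.sum := by rw [List.sum_cons]
      omega
  | case4 a b rest x steps h1 h2 ih =>
      intro _
      have hmin : min ((b :: rest).getLastD 0 - x) a = a := by omega
      rw [solveAux, dif_pos h1, dif_neg h2, ih (by simp)]
      rw [kcount_shift a (b :: rest) x (by simp) (by omega)]
      simp only [List.sum_cons]
      rw [hmin]
      omega
  | case5 a b rest x steps h1 h2 ih =>
      intro _
      rw [getLastD_cons_ne _ 0 (b :: rest) (by simp)] at h2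
      have hmin : min ((b :: rest).getLastD 0 - x) a = (b :: rest).getLastD 0 - x := by omega
      rw [solveAux, dif_neg h1,
        dif_pos (by rw [getLastD_cons_ne _ 0 (b :: rest) (by simp)]; exact h2),
        ih (by simp)]
      rw [kcount_cc_some a b rest x (x + a) (b :: rest) (by rw [bscan, if_pos (by omega)])]
      rw [show ((if x + a - (b :: rest).getLastD 0 > 0
              then [x + a - (b :: rest).getLastD 0] else []) ++ (b :: rest).dropLast : List Int)
            = (x + a - (b :: rest).getLastD 0) :: (b :: rest).dropLast from by
          rw [if_pos (by omega)]; simp]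
      rw [List.dropLast_cons₂]
      rw [show (a - min ((b :: rest).getLastD 0 - x) a : Int)
            = x + a - (b :: rest).getLastD 0 from by omega]
      simp only [List.sum_cons]
      have hsd : (b :: rest).dropLast.sum + (b :: rest).getLastD 0 = (b :: rest).sum := by
        conv_rhs => rw [← dropLast_append_getLastD (b :: rest) (by simp)]
        simp
      have hbr : ((b :: rest) : List Int).sum = b + rest.sum := by rw [List.sum_cons]
      have hdl : (((x + a - (b :: rest).getLastD 0) :: (b :: rest).dropLast) : List Int).sum
          = (x + a - (b :: rest).getLastD 0) + (b :: rest).dropLast.sum := by rw [List.sum_cons]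
      omega
  | case6 a b rest x steps h1 h2 ih =>
      intro _
      exfalso
      simp only [List.getLastD_cons] at h1 h2
      omega

-- kcount at gauge 0 is what B's outer loop computes (combos plus the final-combo bit,
-- with the remaining health recovered as w.sum - 2 * comboed)
theorem kcount_bphases (w : List Int) :
    kcount w 0 = (bphases w).1
      + (if (bphases w).2.1 ≠ [] ∧ (w.sum - 2 * (bphases w).2.2) / 2 ≠ 0 then 1 else 0) := by
  induction w using bphases.induct with
  | case1 =>
      simp [kcount, bphases]
  | case2 h =>
      rw [kcount, bphases]
      simp only [List.sum_cons, List.sum_nil]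
      split_ifs <;> simp_all
  | case3 a b rest hbs =>
      rw [kcount_cc_none a b rest 0 hbs, bphases_cc_none a b rest hbs]
      split_ifs <;> simp_all
  | case4 a b rest g cs hbs ih =>
      have hb := bphases_cc_some a b rest g cs hbs
      rw [kcount_cc_some a b rest 0 g cs hbs]
      have hsum := bscan_sum _ _ _ _ _ hbs
      have hge := bscan_ge _ _ _ _ _ hbs
      obtain ⟨hcne, hclast⟩ := bscan_last _ _ _ _ _ hbs
      have hcsd : cs.dropLast.sum + cs.getLastD 0 = cs.sum := by
        conv_rhs => rw [← dropLast_append_getLastD cs hcne]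
        simp
      have htw : ((a :: b :: rest) : List Int).getLastD 0 = (b :: rest).getLastD 0 :=
        getLastD_cons_ne a 0 (b :: rest) (by simp)
      rw [htw] at hclast
      simp only [dite_eq_ite] at ih
      have hside : ((if g - (b :: rest).getLastD 0 > 0 then [g - (b :: rest).getLastD 0] else [])
              ++ cs.dropLast : List Int).sum
          = ((a :: b :: rest) : List Int).sum - 2 * (b :: rest).getLastD 0 := by
        split_ifs with hr
        · simp only [List.singleton_append, List.sum_cons, List.sum_cons] at *
          omega
        · simp only [List.nil_append, List.sum_cons] at *
          omega
      rw [ih]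
      simp only [hb, hside]
      have e : (((a :: b :: rest) : List Int).sum - 2 * (b :: rest).getLastD 0)
            - 2 * (bphases ((if g - (b :: rest).getLastD 0 > 0
                then [g - (b :: rest).getLastD 0] else []) ++ cs.dropLast)).2.2
          = ((a :: b :: rest) : List Int).sum
            - 2 * ((bphases ((if g - (b :: rest).getLastD 0 > 0
                then [g - (b :: rest).getLastD 0] else []) ++ cs.dropLast)).2.2
                  + (b :: rest).getLastD 0) := by ring
      simp only [e]
      split_ifs <;> omega

-- ===== VERDICT (by name: the statement is the Claim_ definition above) =====
theorem solve_spec : Claim_equal_solve := by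
  intro ms _
  unfold Spec_solve
  simp only [solve, solve_alt]
  rw [loop_eq _ 0 0 (fun _ => rfl)]
  simp only [PySem.Int.floordiv_eq_ediv_of_pos (show (0:Int) < 2 by norm_num)]
  rw [kcount_bphases _]
  split_ifs <;> omega
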